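-- pv_equiv track=rewrite | github.com/tomohart-001/sprint2-3dextrusion | services/council_service.py | _determine_zone_key
-- ===== SOURCE A (Python) =====
-- from typing import Dict, Any, Optional, List
--
-- def _determine_zone_key(zoning: str, council_data: Dict) -> str:
--     """Determine the best matching zone key from available zones"""
--     zoning_lower = zoning.lower()
--
--     if zoning_lower in council_data:
--         return zoning_lower
--
--     # Pattern matching for common zone types
--     if any(term in zoning_lower for term in ['mixed', 'medium', 'urban']):
--         for zone in ['mixed_housing_urban', 'medium_density', 'mixed_housing_suburban']:
--             if zone in council_data:
--                 return zone
--
--     if 'terraced' in zoning_lower or 'apartment' in zoning_lower: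
--         if 'terraced_housing_apartment' in council_data:
--             return 'terraced_housing_apartment'
--
--     return 'residential'
-- ===== SOURCE B (Python) =====
-- def _determine_zone_key(zoning: str, council_data) -> str:
--     """Determine the best matching zone key from available zones"""
--     zoning_lower = zoning.lower()
--
--     # Priority list of acceptable zones, best first; then one pass over the
--     # council data keeping the best (lowest) rank seen.
--     wanted = [zoning_lower]
--     if any(t in zoning_lower for t in ('mixed', 'medium', 'urban')):
--         wanted += ['mixed_housing_urban', 'medium_density', 'mixed_housing_suburban']
--     if 'terraced' in zoning_lower or 'apartment' in zoning_lower: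
--         wanted.append('terraced_housing_apartment')
--
--     best = len(wanted)
--     for key in council_data:
--         try:
--             best = min(best, wanted.index(key))
--         except ValueError:
--             pass
--     return wanted[best] if best < len(wanted) else 'residential'
-- ===== Notes on version B (the rewrite author's own statement) =====
-- stated objective: alternative
-- what changed: B first builds a priority list of acceptable zones (exact match, then the triggered rules' candidates), then makes a single pass over the council data keeping the best (lowest) rank seen, instead of A's per-candidate membership scans of the dict.
import Mathlib
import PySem

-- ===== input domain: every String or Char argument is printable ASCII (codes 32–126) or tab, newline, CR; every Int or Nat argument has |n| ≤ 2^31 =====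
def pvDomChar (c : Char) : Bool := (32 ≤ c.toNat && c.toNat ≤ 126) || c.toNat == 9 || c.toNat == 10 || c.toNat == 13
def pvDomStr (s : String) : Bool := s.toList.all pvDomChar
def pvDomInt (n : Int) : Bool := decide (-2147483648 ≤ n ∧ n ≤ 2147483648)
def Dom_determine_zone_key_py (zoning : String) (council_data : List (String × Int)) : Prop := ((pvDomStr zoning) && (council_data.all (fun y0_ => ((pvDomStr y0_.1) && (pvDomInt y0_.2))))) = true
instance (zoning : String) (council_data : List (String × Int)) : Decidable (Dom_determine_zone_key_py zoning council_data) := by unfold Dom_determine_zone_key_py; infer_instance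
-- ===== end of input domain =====

-- B builds a priority list of acceptable zones and takes the best-ranked council key in one pass (alternative traversal); return values identical.
-- ===== PORT A =====
def determine_zone_key_py (zoning : String) (council_data : List (String × Int)) : String :=
  let zl := PySem.Str.lower zoning
  if council_data.any (fun p => p.1 == zl) then zl
  else
    let step2 :=
      if ["mixed", "medium", "urban"].any (fun t => PySem.Str.isIn t zl) then
        if council_data.any (fun p => p.1 == "mixed_housing_urban") then some "mixed_housing_urban"
        else if council_data.any (fun p => p.1 == "medium_density") then some "medium_density"
        else if council_data.any (fun p => p.1 == "mixed_housing_suburban") then some "mixed_housing_suburban"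
        else none
      else none
    match step2 with
    | some z => z
    | none =>
      if (PySem.Str.isIn "terraced" zl || PySem.Str.isIn "apartment" zl)
          && council_data.any (fun p => p.1 == "terraced_housing_apartment")
      then "terraced_housing_apartment" else "residential"

-- ===== PORT B =====
-- the try/except body of B's loop: best = min(best, wanted.index(key)), a missing key leaves best unchanged
def pvRank (wanted : List String) (b : Nat) (key : String) : Nat :=
  match PySem.List.index? wanted key with
  | some i => min b i
  | none => b

def determine_zone_key_py_alt (zoning : String) (council_data : List (String × Int)) : String :=
  let zl := PySem.Str.lower zoning
  let wanted := [zl]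
    ++ (if ["mixed", "medium", "urban"].any (fun t => PySem.Str.isIn t zl) then
          ["mixed_housing_urban", "medium_density", "mixed_housing_suburban"] else [])
    ++ (if PySem.Str.isIn "terraced" zl || PySem.Str.isIn "apartment" zl then
          ["terraced_housing_apartment"] else [])
  let best := council_data.foldl (fun b p => pvRank wanted b p.1) wanted.length
  wanted.getD best "residential"

-- ===== PRECONDITION & SPEC =====
def Spec_determine_zone_key_py (zoning : String) (council_data : List (String × Int)) (out : String) : Prop := out = determine_zone_key_py_alt zoning council_data
instance (zoning : String) (council_data : List (String × Int)) (out : String) : Decidable (Spec_determine_zone_key_py zoning council_data out) := by unfold Spec_determine_zone_key_py; infer_instance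

-- ===== CLAIM (what is proved, stated in full; the proofs are below) =====
def Claim_equal_determine_zone_key_py : Prop := ∀ (zoning : String) (council_data : List (String × Int)), Dom_determine_zone_key_py zoning council_data → Spec_determine_zone_key_py zoning council_data (determine_zone_key_py zoning council_data)

-- ===== LEMMAS AND PROOFS =====
-- "first zone of the priority list present among the council keys, else residential"
def pvFirstFound (cd : List (String × Int)) : List String → String
  | [] => "residential"
  | z :: rest => if cd.any (fun p => p.1 == z) then z else pvFirstFound cd rest

theorem pvFold_nil_wanted (cd : List (String × Int)) (b : Nat) :
    cd.foldl (fun b p => pvRank [] b p.1) b = b := by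
  induction cd generalizing b with
  | nil => rfl
  | cons p t ih => simp [List.foldl, pvRank, PySem.List.index?_eq_idxOf?]

theorem pvFold_zero (w : List String) (cd : List (String × Int)) :
    cd.foldl (fun b p => pvRank w b p.1) 0 = 0 := by
  induction cd with
  | nil => rfl
  | cons p t ih =>
    have : pvRank w 0 p.1 = 0 := by
      unfold pvRank; cases PySem.List.index? w p.1 <;> simp
    simp [List.foldl, this, ih]

theorem pvFold_cons (z : String) (w : List String) (cd : List (String × Int)) (b : Nat) :
    cd.foldl (fun b p => pvRank (z :: w) b p.1) (b + 1) =
      if cd.any (fun p => p.1 == z) then 0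
      else cd.foldl (fun b p => pvRank w b p.1) b + 1 := by
  induction cd generalizing b with
  | nil => rfl
  | cons p t ih =>
    by_cases hz : p.1 = z
    · have h1 : pvRank (z :: w) (b + 1) p.1 = 0 := by
        unfold pvRank
        rw [hz, PySem.List.index?_cons_self]
        simp
      have hany : ((p :: t).any fun q => q.1 == z) = true := by simp [hz]
      simp only [List.foldl_cons, h1, hany, if_true, pvFold_zero]
    · have h2 : pvRank (z :: w) (b + 1) p.1 = pvRank w b p.1 + 1 := by
        unfold pvRank
        rw [PySem.List.index?_cons_of_ne w (Ne.symm hz)]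
        cases PySem.List.index? w p.1 <;> simp [Nat.succ_min_succ]
      have hne : (p.1 == z) = false := by simp [hz]
      simp only [List.foldl_cons, List.any_cons, hne, Bool.false_or, h2]
      exact ih (pvRank w b p.1)

theorem pvFold_firstFound (w : List String) (cd : List (String × Int)) :
    w.getD (cd.foldl (fun b p => pvRank w b p.1) w.length) "residential" = pvFirstFound cd w := by
  induction w with
  | nil => simp [pvFold_nil_wanted, pvFirstFound]
  | cons z rest ih =>
    show (z :: rest).getD (cd.foldl (fun b p => pvRank (z :: rest) b p.1) (rest.length + 1)) "residential" = _
    rw [pvFold_cons]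
    unfold pvFirstFound
    split_ifs with h
    · simp
    · simpa using ih

-- ===== VERDICT (by name: the statement is the Claim_ definition above) =====
theorem determine_zone_key_py_spec : Claim_equal_determine_zone_key_py := by
  intro zoning council_data _
  unfold Spec_determine_zone_key_py determine_zone_key_py determine_zone_key_py_alt
  rw [pvFold_firstFound]
  simp only [List.any_cons, List.any_nil]
  split_ifs <;> simp_all [pvFirstFound]
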